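-- pv_equiv track=rewrite | github.com/Hean-Macharia/cluster-points | app.py | get_aggregate_points
-- ===== SOURCE A (Python) =====
-- GRADE_POINTS = {
--     'A': 12, 'A-': 11, 'B+': 10, 'B': 9, 'B-': 8,
--     'C+': 7, 'C': 6, 'C-': 5, 'D+': 4, 'D': 3,
--     'D-': 2, 'E': 1
-- }
--
-- def get_aggregate_points(grades):
--     """
--     Calculate Aggregate Points (AGP) - sum of best 7 subjects ONLY
--     This is y in the formula: Cluster Points = sqrt((x/48) * (y/84)) * 48
--     """
--     all_points = []
--
--     # Collect all subjects with valid grades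
--     for subject, grade in grades.items():
--         if grade:
--             points = GRADE_POINTS.get(grade, 0)
--             all_points.append((subject, points))
--
--     # Sort by points (descending)
--     all_points.sort(key=lambda x: x[1], reverse=True)
--
--     # Take top 7 only - FIXED: Always take exactly top 7 or less
--     top_7 = all_points[:7]
--
--     # Calculate sum of points for top 7 subjects
--     total_points = sum(p for _, p in top_7)
--
--     return total_points, top_7
-- ===== SOURCE B (Python) =====
-- GRADE_POINTS = {
--     'A': 12, 'A-': 11, 'B+': 10, 'B': 9, 'B-': 8,
--     'C+': 7, 'C': 6, 'C-': 5, 'D+': 4, 'D': 3,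
--     'D-': 2, 'E': 1
-- }
-- def get_aggregate_points(grades):
--     buckets = [[] for _ in range(13)]
--     for s, g in grades.items():
--         if g:
--             buckets[GRADE_POINTS.get(g, 0)].append(s)
--     ordered = [(s, p) for p in range(12, -1, -1) for s in buckets[p]]
--     top_7 = ordered[:7]
--     return sum(p for _, p in top_7), top_7
-- ===== Notes on version B (the rewrite author's own statement) =====
-- stated objective: alternative
-- what changed: Replaces the comparison sort (sort by points, reverse=True) with a single-pass distribution into 13 point-value buckets (grade points are always in 0..12) concatenated in descending point order, which reproduces the stable descending order exactly.
import Mathlib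
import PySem

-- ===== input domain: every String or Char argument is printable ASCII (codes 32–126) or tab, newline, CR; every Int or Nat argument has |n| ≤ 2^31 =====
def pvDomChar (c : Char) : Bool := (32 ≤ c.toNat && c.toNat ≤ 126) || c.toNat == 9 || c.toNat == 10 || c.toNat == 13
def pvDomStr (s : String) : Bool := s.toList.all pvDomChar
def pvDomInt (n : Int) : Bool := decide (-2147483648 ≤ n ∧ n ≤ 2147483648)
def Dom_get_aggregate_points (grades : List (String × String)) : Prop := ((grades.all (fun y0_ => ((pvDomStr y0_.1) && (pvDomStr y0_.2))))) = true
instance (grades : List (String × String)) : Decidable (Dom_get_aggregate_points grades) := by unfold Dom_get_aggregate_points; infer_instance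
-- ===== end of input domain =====

-- B replaces A's comparison sort by a one-pass distribution into 13 point buckets (points are
-- always in 0..12) concatenated in descending point order: a bucket-sort alternative, same value.

def gradePoints : PySem.Dict String Int :=
  PySem.Dict.ofList [("A", 12), ("A-", 11), ("B+", 10), ("B", 9), ("B-", 8),
                     ("C+", 7), ("C", 6), ("C-", 5), ("D+", 4), ("D", 3),
                     ("D-", 2), ("E", 1)]

-- ===== PORT A =====
def get_aggregate_points (grades : List (String × String)) : Int × (List (String × Int)) :=
  -- for subject, grade in grades.items(): if grade: all_points.append((subject, GRADE_POINTS.get(grade, 0)))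
  let all_points := (PySem.Dict.ofList grades).items.foldl
    (fun acc sg => if sg.2 ≠ "" then acc ++ [(sg.1, PySem.Dict.getD gradePoints sg.2 0)] else acc) []
  -- all_points.sort(key=lambda x: x[1], reverse=True)
  let sorted := PySem.List.sorted all_points (fun x => x.2) true
  -- top_7 = all_points[:7]
  let top_7 := PySem.List.slice sorted none (some 7)
  -- total_points = sum(p for _, p in top_7)
  let total_points := (top_7.map (fun sp => sp.2)).sum
  (total_points, top_7)

-- ===== PORT B =====
def get_aggregate_points_alt (grades : List (String × String)) : Int × (List (String × Int)) :=
  -- buckets = [[] for _ in range(13)]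
  let buckets0 : List (List String) := List.replicate 13 []
  -- for s, g in grades.items(): if g: buckets[GRADE_POINTS.get(g, 0)].append(s)
  -- (.toNat is exact here: the index is a GRADE_POINTS value or 0, hence in 0..12 and in range)
  let buckets := (PySem.Dict.ofList grades).items.foldl
    (fun b sg => if sg.2 ≠ "" then b.modify (PySem.Dict.getD gradePoints sg.2 0).toNat (fun l => l ++ [sg.1]) else b) buckets0
  -- ordered = [(s, p) for p in range(12, -1, -1) for s in buckets[p]]  (index p always in range)
  let ordered := (PySem.List.pyRange 12 (-1) (-1)).flatMap
    (fun p => (buckets.getD p.toNat []).map (fun s => (s, p)))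
  -- top_7 = ordered[:7];  return sum(p for _, p in top_7), top_7
  let top_7 := PySem.List.slice ordered none (some 7)
  ((top_7.map (fun sp => sp.2)).sum, top_7)

-- ===== PRECONDITION & SPEC =====
def Spec_get_aggregate_points (grades : List (String × String)) (out : Int × (List (String × Int))) : Prop := out = get_aggregate_points_alt grades
instance (grades : List (String × String)) (out : Int × (List (String × Int))) : Decidable (Spec_get_aggregate_points grades out) := by unfold Spec_get_aggregate_points; infer_instance

-- ===== CLAIM (what is proved, stated in full; the proofs are below) =====
def Claim_equal_get_aggregate_points : Prop := ∀ (grades : List (String × String)), Dom_get_aggregate_points grades → Spec_get_aggregate_points grades (get_aggregate_points grades)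

-- ===== LEMMAS AND PROOFS =====

-- the possible point values, descending
def Pts : List Int := [12, 11, 10, 9, 8, 7, 6, 5, 4, 3, 2, 1, 0]

-- the bucket of (subject, points) pairs with point value p, in original order
def fl (xs : List (String × Int)) (p : Int) : List (String × Int) :=
  xs.filter (fun sp => sp.2 == p)

set_option maxHeartbeats 1000000 in
lemma pts_bounds (g : String) :
    0 ≤ PySem.Dict.getD gradePoints g 0 ∧ PySem.Dict.getD gradePoints g 0 ≤ 12 := by
  rcases h : PySem.Dict.get? gradePoints g with _ | v
  · simp [PySem.Dict.getD_eq_get?_getD, h]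
  · have hmem := PySem.Dict.mem_items_of_get?_eq_some (d := gradePoints) (k := g) (v := v) h
    have hit : gradePoints.items = [("A", 12), ("A-", 11), ("B+", 10), ("B", 9), ("B-", 8),
                     ("C+", 7), ("C", 6), ("C-", 5), ("D+", 4), ("D", 3),
                     ("D-", 2), ("E", 1)] := by rfl
    rw [hit] at hmem
    simp only [List.mem_cons, List.not_mem_nil, or_false, Prod.mk.injEq] at hmem
    rw [PySem.Dict.getD_eq_get?_getD, h]
    rcases hmem with ⟨_,h⟩|⟨_,h⟩|⟨_,h⟩|⟨_,h⟩|⟨_,h⟩|⟨_,h⟩|⟨_,h⟩|⟨_,h⟩|⟨_,h⟩|⟨_,h⟩|⟨_,h⟩|⟨_,h⟩ <;> subst h <;> simp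

lemma insertBy_split {α : Type} (before : α → α → Bool) (x : α) (hi lo : List α)
    (h1 : ∀ y ∈ hi, before x y = false)
    (h2 : ∀ z ∈ lo.head?, before x z = true) :
    PySem.List.insertBy before x (hi ++ lo) = hi ++ x :: lo := by
  induction hi with
  | nil =>
    cases lo with
    | nil => rfl
    | cons z zs =>
      have := h2 z (by simp)
      simp [PySem.List.insertBy, this]
  | cons h t ih =>
    have hh := h1 h (by simp)
    simp only [List.cons_append, PySem.List.insertBy, hh]
    simp only [Bool.false_eq_true, if_false, List.cons.injEq, true_and]
    exact ih (fun y hy => h1 y (by simp [hy]))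

lemma fl_append_ne (ys : List (String × Int)) (x : String × Int) (p : Int) (hp : p ≠ x.2) :
    fl (ys ++ [x]) p = fl ys p := by
  simp [fl, List.filter_append]
  omega

lemma fl_append_self (ys : List (String × Int)) (x : String × Int) :
    fl (ys ++ [x]) x.2 = fl ys x.2 ++ [x] := by
  simp [fl, List.filter_append]

lemma snd_of_mem_fl {ys : List (String × Int)} {p : Int} {y : String × Int}
    (h : y ∈ fl ys p) : y.2 = p := by
  have := (List.mem_filter.mp h).2
  simpa using this

lemma insert_F_general (ys : List (String × Int)) (x : String × Int) (ps qs : List Int)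
    (hps : ∀ p ∈ ps, x.2 < p) (hqs : ∀ p ∈ qs, p < x.2) :
    PySem.List.insertBy (fun a b : String × Int => decide (b.2 < a.2)) x
      ((ps ++ x.2 :: qs).flatMap (fl ys))
      = (ps ++ x.2 :: qs).flatMap (fl (ys ++ [x])) := by
  have hR : (ps ++ x.2 :: qs).flatMap (fl (ys ++ [x]))
      = ps.flatMap (fl ys) ++ (fl ys x.2 ++ [x]) ++ qs.flatMap (fl ys) := by
    rw [List.flatMap_append, List.flatMap_cons]
    rw [List.flatMap_congr (fun p hp => fl_append_ne ys x p (by have := hps p hp; omega)),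
        fl_append_self,
        List.flatMap_congr (fun p hp => fl_append_ne ys x p (by have := hqs p hp; omega))]
    simp [List.append_assoc]
  have hL : (ps ++ x.2 :: qs).flatMap (fl ys)
      = (ps.flatMap (fl ys) ++ fl ys x.2) ++ qs.flatMap (fl ys) := by
    rw [List.flatMap_append, List.flatMap_cons]
    simp [List.append_assoc]
  rw [hL, hR]
  rw [insertBy_split]
  · simp [List.append_assoc]
  · intro y hy
    rcases List.mem_append.mp hy with hy | hy
    · obtain ⟨p, hp, hyp⟩ := List.mem_flatMap.mp hy
      have := snd_of_mem_fl hyp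
      have := hps p hp
      simp; omega
    · have := snd_of_mem_fl hy
      simp; omega
  · intro z hz
    have hz' : z ∈ qs.flatMap (fl ys) := List.mem_of_mem_head? hz
    obtain ⟨p, hp, hzp⟩ := List.mem_flatMap.mp hz'
    have := snd_of_mem_fl hzp
    have := hqs p hp
    simp; omega

lemma split_of_mem {k : Int} {P : List Int} (h : k ∈ P) (hs : P.Pairwise (· > ·)) :
    ∃ ps qs, P = ps ++ k :: qs ∧ (∀ p ∈ ps, k < p) ∧ (∀ p ∈ qs, p < k) := by
  induction P with
  | nil => simp at h
  | cons a P ih =>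
    rcases List.mem_cons.mp h with rfl | hk
    · exact ⟨[], P, by simp, by simp, fun p hp => (List.pairwise_cons.mp hs).1 p hp⟩
    · obtain ⟨ps, qs, heq, hps, hqs⟩ := ih hk (List.pairwise_cons.mp hs).2
      refine ⟨a :: ps, qs, by simp [heq], ?_, hqs⟩
      intro p hp
      rcases List.mem_cons.mp hp with rfl | hp'
      · exact (List.pairwise_cons.mp hs).1 k hk
      · exact hps p hp'

lemma insert_F (ys : List (String × Int)) (x : String × Int)
    (hx : 0 ≤ x.2 ∧ x.2 ≤ 12) :
    PySem.List.insertBy (fun a b : String × Int => decide (b.2 < a.2)) x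
      (Pts.flatMap (fun p => fl ys p)) = Pts.flatMap (fun p => fl (ys ++ [x]) p) := by
  have hk : x.2 ∈ Pts := by simp [Pts]; omega
  have hs : Pts.Pairwise (· > ·) := by decide
  obtain ⟨ps, qs, heq, hps, hqs⟩ := split_of_mem hk hs
  rw [heq]
  exact insert_F_general ys x ps qs hps hqs

lemma foldl_insert_F (xs : List (String × Int)) :
    ∀ ys, (∀ x ∈ xs, 0 ≤ x.2 ∧ x.2 ≤ 12) →
    xs.foldl (fun acc x => PySem.List.insertBy (fun a b : String × Int => decide (b.2 < a.2)) x acc)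
      (Pts.flatMap (fun p => fl ys p)) = Pts.flatMap (fun p => fl (ys ++ xs) p) := by
  induction xs with
  | nil => intro ys _; simp
  | cons x t ih =>
    intro ys h
    rw [List.foldl_cons, insert_F ys x (h x (by simp)), ih (ys ++ [x]) (fun z hz => h z (by simp [hz]))]
    simp

lemma sorted_eq_flat (xs : List (String × Int)) (h : ∀ x ∈ xs, 0 ≤ x.2 ∧ x.2 ≤ 12) :
    PySem.List.sorted xs (fun sp => sp.2) true = Pts.flatMap (fun p => fl xs p) := by
  rw [PySem.List.sorted_rev_eq_foldl_insertBy]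
  have h0 : ([] : List (String × Int)) = Pts.flatMap (fun p => fl [] p) := by
    simp [fl]
  rw [h0, foldl_insert_F xs [] h]
  simp

lemma bucket_getD (xs : List (String × Int)) :
    ∀ (b : List (List String)), b.length = 13 → (∀ x ∈ xs, 0 ≤ x.2 ∧ x.2 ≤ 12) →
    ∀ i : Nat, i < 13 →
    (xs.foldl (fun b sp => b.modify sp.2.toNat (fun l => l ++ [sp.1])) b).getD i []
      = b.getD i [] ++ (fl xs (i : Int)).map (·.1) := by
  induction xs with
  | nil => intro b hb h i hi; simp [fl]
  | cons x t ih =>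
    intro b hb h i hi
    rw [List.foldl_cons]
    have hx := h x (by simp)
    have hlen : (b.modify x.2.toNat (fun l => l ++ [x.1])).length = 13 := by
      simp [hb]
    rw [ih _ hlen (fun z hz => h z (by simp [hz])) i hi]
    have hfl : fl (x :: t) (i : Int) = (if x.2 == (i : Int) then [x] else []) ++ fl t (i : Int) := by
      simp [fl, List.filter_cons]
      split_ifs <;> simp_all
    rw [hfl]
    by_cases hxi : x.2.toNat = i
    · have hbeq : (x.2 == (i : Int)) = true := by
        simp; omega
      rw [List.getD_eq_getElem?_getD, List.getElem?_modify]
      simp only [hxi]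
      rw [hbeq]
      have : i < b.length := by omega
      simp [List.getD_eq_getElem?_getD, List.getElem?_eq_getElem this]
    · have hbeq : (x.2 == (i : Int)) = false := by
        simp; omega
      rw [List.getD_eq_getElem?_getD, List.getElem?_modify]
      simp only [hxi]
      rw [hbeq]
      simp [List.getD_eq_getElem?_getD]

lemma map_repair (xs : List (String × Int)) (p : Int) :
    ((fl xs p).map (·.1)).map (fun s => (s, p)) = fl xs p := by
  rw [List.map_map]
  conv_rhs => rw [← List.map_id (fl xs p)]
  apply List.map_congr_left
  intro y hy
  have h2 := snd_of_mem_fl hy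
  simp [Function.comp, ← h2]

lemma ports_agree (grades : List (String × String)) :
    get_aggregate_points grades = get_aggregate_points_alt grades := by
  unfold get_aggregate_points get_aggregate_points_alt
  simp only [PySem.List.foldl_append_ite (p := fun sg : String × String => sg.2 ≠ "")
      (f := fun sg : String × String => (sg.1, PySem.Dict.getD gradePoints sg.2 0)),
    PySem.List.foldl_ite_eq_foldl_filter (p := fun sg : String × String => sg.2 ≠ "")]
  set items := (PySem.Dict.ofList grades).items with hitems
  set flt := items.filter (fun sg => decide (sg.2 ≠ "")) with hflt
  set valid := flt.map (fun sg => (sg.1, PySem.Dict.getD gradePoints sg.2 0)) with hvalid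
  simp only [List.nil_append]
  have hbound : ∀ x ∈ valid, 0 ≤ x.2 ∧ x.2 ≤ 12 := by
    intro x hx
    obtain ⟨sg, _, rfl⟩ := List.mem_map.mp hx
    exact pts_bounds sg.2
  -- the buckets loop over the filtered items is the same loop over the (subject, points) pairs
  have hfold : flt.foldl
      (fun b sg => b.modify (PySem.Dict.getD gradePoints sg.2 0).toNat (fun l => l ++ [sg.1]))
      (List.replicate 13 [])
      = valid.foldl (fun b sp => b.modify sp.2.toNat (fun l => l ++ [sp.1])) (List.replicate 13 []) := by
    rw [hvalid, List.foldl_map]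
  rw [hfold]
  have hrange : PySem.List.pyRange 12 (-1) (-1) = Pts := by decide
  rw [hrange]
  -- the concatenated buckets are the buckets of valid, i.e. the stable descending sort
  have hflat : Pts.flatMap (fun p =>
      ((valid.foldl (fun b sp => b.modify sp.2.toNat (fun l => l ++ [sp.1]))
        (List.replicate 13 [])).getD p.toNat []).map (fun s => (s, p)))
      = Pts.flatMap (fun p => fl valid p) := by
    apply List.flatMap_congr
    intro p hp
    have hpb : 0 ≤ p ∧ p ≤ 12 := by
      simp [Pts] at hp
      rcases hp with rfl|rfl|rfl|rfl|rfl|rfl|rfl|rfl|rfl|rfl|rfl|rfl|rfl <;> omega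
    have hplt : p.toNat < 13 := by omega
    rw [bucket_getD valid (List.replicate 13 []) (by simp) hbound p.toNat hplt]
    have hcast : ((p.toNat : Nat) : Int) = p := by omega
    rw [hcast]
    simp only [List.getD_eq_getElem?_getD, List.getElem?_replicate]
    simp [hplt]
    rw [← List.map_map]
    exact map_repair valid p
  rw [hflat, sorted_eq_flat valid hbound]

-- ===== VERDICT (by name: the statement is the Claim_ definition above) =====
theorem get_aggregate_points_spec : Claim_equal_get_aggregate_points := by
  intro grades _
  unfold Spec_get_aggregate_points
  exact ports_agree grades
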